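-- pv_equiv track=rewrite | github.com/Nanorex/politics_tracker | base_old.py | count_party_invalid_votes
-- ===== SOURCE A (Python) =====
-- def count_party_invalid_votes(party, data):
-- 	invalid_counter = 0
-- 	for ballot in data:
-- 		is_in_section = False
-- 		for participant in ballot:
-- 			if participant[3] != party:
-- 				if is_in_section:
-- 					break
-- 				else:
-- 					continue
-- 			else:
-- 				is_in_section = True
-- 				if participant[10] == "1":
-- 					invalid_counter += 1
-- 	return invalid_counter
-- ===== SOURCE B (Python) =====
-- def _runs(party, ballot):
--     """Run-length encode the ballot into maximal consecutive groups keyed by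
--     whether the row belongs to the party (like itertools.groupby)."""
--     runs = []
--     key = False
--     cur = []
--     for p in ballot:
--         k = (p[3] == party)
--         if cur and k == key:
--             cur.append(p)
--         else:
--             if cur:
--                 runs.append((key, cur))
--             key, cur = k, [p]
--     if cur:
--         runs.append((key, cur))
--     return runs
--
--
-- def count_party_invalid_votes(party, data):
--     total = 0
--     for ballot in data:
--         for is_party, rows in _runs(party, ballot):
--             if is_party:
--                 total += len([p for p in rows if p[10] == "1"])
--                 break
--     return total
-- ===== Notes on version B (the rewrite author's own statement) =====
-- stated objective: idiomatic
-- what changed: Per ballot, B first run-length-encodes the rows into maximal groups keyed by party membership (a groupby-style pass building an explicit list of runs), then takes the first party group and counts its rows with field 10 == '1'; A instead threads an is_in_section flag with break through a single loop.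
import Mathlib
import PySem

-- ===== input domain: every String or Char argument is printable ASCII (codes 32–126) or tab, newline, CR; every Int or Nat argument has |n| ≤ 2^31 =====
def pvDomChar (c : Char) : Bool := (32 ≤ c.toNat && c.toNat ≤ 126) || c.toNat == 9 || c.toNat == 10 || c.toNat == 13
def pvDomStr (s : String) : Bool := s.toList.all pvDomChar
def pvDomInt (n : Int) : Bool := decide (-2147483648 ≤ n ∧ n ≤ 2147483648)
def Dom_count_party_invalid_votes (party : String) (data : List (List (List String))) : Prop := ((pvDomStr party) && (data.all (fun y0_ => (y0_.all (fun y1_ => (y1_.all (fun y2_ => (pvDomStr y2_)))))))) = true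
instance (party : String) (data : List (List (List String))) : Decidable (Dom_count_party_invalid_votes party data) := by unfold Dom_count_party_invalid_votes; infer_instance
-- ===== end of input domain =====

-- B run-length-encodes each ballot into party/non-party groups (groupby style), then counts
-- invalid rows of the first party group; A threads a flag with break. Same cost, different structure.

-- ===== PORT A =====
-- inner loop of A over a ballot: state = is_in_section flag and the counter;
-- participant[3]/participant[10] are ported with PySem.List.pyGet?; the none case
-- (IndexError in Python) is excluded by Pre_ and defaulted to "".
def pvA_inner (party : String) : List (List String) → Bool → Int → Int
  | [], _, acc => acc
  | p :: rest, flag, acc =>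
    if ((PySem.List.pyGet? p 3).getD "") ≠ party then
      if flag then acc else pvA_inner party rest flag acc
    else
      pvA_inner party rest true
        (if ((PySem.List.pyGet? p 10).getD "") = "1" then acc + 1 else acc)

def count_party_invalid_votes (party : String) (data : List (List (List String))) : Int :=
  data.foldl (fun acc ballot => pvA_inner party ballot false acc) 0

-- ===== PORT B =====
-- p[3] == party as a Bool (the groupby key of Source B)
def pvKey (party : String) (p : List String) : Bool :=
  decide (((PySem.List.pyGet? p 3).getD "") = party)

-- p[10] == "1" as a Bool
def pvInv (p : List String) : Bool :=
  decide (((PySem.List.pyGet? p 10).getD "") = "1")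

-- one step of Source B's grouping loop: state = (finished runs, key of open run, open run)
def pvStep (party : String)
    (st : List (Bool × List (List String)) × Bool × List (List String)) (p : List String) :
    List (Bool × List (List String)) × Bool × List (List String) :=
  match st with
  | (runs, key, cur) =>
    if cur ≠ [] ∧ pvKey party p = key then (runs, key, cur ++ [p])
    else ((if cur ≠ [] then runs ++ [(key, cur)] else runs), pvKey party p, [p])

-- the trailing `if cur: runs.append((key, cur))` flush of Source B
def pvFinalize (st : List (Bool × List (List String)) × Bool × List (List String)) :
    List (Bool × List (List String)) :=
  match st with
  | (runs, key, cur) => if cur ≠ [] then runs ++ [(key, cur)] else runs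

-- Source B's _runs: run-length encoding of the ballot by party membership
def pvRuns (party : String) (ballot : List (List String)) : List (Bool × List (List String)) :=
  pvFinalize (ballot.foldl (pvStep party) ([], false, []))

-- Source B's per-ballot loop: first party group's invalid count, then break
def pvCountFirst : List (Bool × List (List String)) → Int
  | [] => 0
  | (k, rows) :: rest => if k then ((rows.filter pvInv).length : Int) else pvCountFirst rest

def count_party_invalid_votes_alt (party : String) (data : List (List (List String))) : Int :=
  data.foldl (fun acc ballot => acc + pvCountFirst (pvRuns party ballot)) 0

-- ===== PRECONDITION & SPEC =====
-- Pre_ excludes the inputs on which Python A raises IndexError (a row shorter than 4, or a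
-- party row shorter than 11). It also excludes some inputs on which A returns: rows located
-- after the point where A breaks out of a ballot are never accessed by A, yet Pre_ still
-- constrains their lengths — a closed-form over-approximation of the accessed rows.
def Pre_count_party_invalid_votes (party : String) (data : List (List (List String))) : Prop :=
  ∀ ballot ∈ data, ∀ p ∈ ballot,
    4 ≤ p.length ∧ (((PySem.List.pyGet? p 3).getD "") = party → 11 ≤ p.length)
instance (party : String) (data : List (List (List String))) : Decidable (Pre_count_party_invalid_votes party data) := by unfold Pre_count_party_invalid_votes; infer_instance

def pvWitness_count_party_invalid_votes : String × List (List (List String)) :=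
  ("x", [[["a","b","c","x","e","f","g","h","i","j","1"], ["a","b","c","y"]]])

def Spec_count_party_invalid_votes (party : String) (data : List (List (List String))) (out : Int) : Prop := out = count_party_invalid_votes_alt party data
instance (party : String) (data : List (List (List String))) (out : Int) : Decidable (Spec_count_party_invalid_votes party data out) := by unfold Spec_count_party_invalid_votes; infer_instance

-- ===== CLAIM (what is proved, stated in full; the proofs are below) =====
def Claim_equal_count_party_invalid_votes : Prop := ∀ (party : String) (data : List (List (List String))), Dom_count_party_invalid_votes party data → Pre_count_party_invalid_votes party data → Spec_count_party_invalid_votes party data (count_party_invalid_votes party data)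

-- ===== LEMMAS AND PROOFS =====

-- the first contiguous party section of a ballot (proof-only reference value)
def pvSection (party : String) (l : List (List String)) : List (List String) :=
  (l.dropWhile (fun p => !(pvKey party p))).takeWhile (pvKey party)

-- A with the flag set counts invalid rows of the leading party prefix, then breaks.
theorem pvA_true_eq (party : String) :
    ∀ (l : List (List String)) (acc : Int),
      pvA_inner party l true acc
        = acc + (((l.takeWhile (pvKey party)).filter pvInv).length : Int) := by
  intro l
  induction l with
  | nil => intro acc; simp [pvA_inner]
  | cons p rest ih =>
    intro acc
    by_cases hp : ((PySem.List.pyGet? p 3).getD "") = party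
    · have hk : pvKey party p = true := by simp [pvKey, hp]
      simp only [pvA_inner]
      rw [if_neg (not_not_intro hp), ih, List.takeWhile_cons, hk]
      by_cases hi : ((PySem.List.pyGet? p 10).getD "") = "1"
      · have hv : pvInv p = true := by simp [pvInv, hi]
        rw [if_pos hi]
        simp [hv]
        omega
      · have hv : pvInv p = false := by simp [pvInv, hi]
        rw [if_neg hi]
        simp [List.filter_cons, hv]
    · have hk : pvKey party p = false := by simp [pvKey, hp]
      simp only [pvA_inner]
      rw [if_pos hp]
      simp [List.takeWhile_cons, hk]

-- A with the flag unset counts invalid rows of the first party section.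
theorem pvA_false_eq (party : String) :
    ∀ (l : List (List String)) (acc : Int),
      pvA_inner party l false acc
        = acc + (((pvSection party l).filter pvInv).length : Int) := by
  intro l
  induction l with
  | nil => intro acc; simp [pvA_inner, pvSection]
  | cons p rest ih =>
    intro acc
    by_cases hp : ((PySem.List.pyGet? p 3).getD "") = party
    · have hk : pvKey party p = true := by simp [pvKey, hp]
      have hs : pvSection party (p :: rest) = p :: rest.takeWhile (pvKey party) := by
        simp [pvSection, List.dropWhile_cons, hk, List.takeWhile_cons]
      simp only [pvA_inner]
      rw [if_neg (not_not_intro hp), pvA_true_eq, hs]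
      by_cases hi : ((PySem.List.pyGet? p 10).getD "") = "1"
      · have hv : pvInv p = true := by simp [pvInv, hi]
        rw [if_pos hi]
        simp [hv]
        omega
      · have hv : pvInv p = false := by simp [pvInv, hi]
        rw [if_neg hi]
        simp [List.filter_cons, hv]
    · have hk : pvKey party p = false := by simp [pvKey, hp]
      have hs : pvSection party (p :: rest) = pvSection party rest := by
        simp [pvSection, List.dropWhile_cons, hk]
      simp only [pvA_inner]
      rw [if_pos hp, if_neg (by simp : ¬ false = true), ih, hs]

-- shifting already-finished runs out of the grouping fold
theorem pvShift (party : String) :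
    ∀ (l : List (List String)) (runs : List (Bool × List (List String)))
      (key : Bool) (cur : List (List String)), cur ≠ [] →
      pvFinalize (l.foldl (pvStep party) (runs, key, cur))
        = runs ++ pvFinalize (l.foldl (pvStep party) ([], key, cur)) := by
  intro l
  induction l with
  | nil => intro runs key cur hc; simp [pvFinalize, if_pos hc]
  | cons p rest ih =>
    intro runs key cur hc
    by_cases hk : pvKey party p = key
    · have hstep : ∀ rs : List (Bool × List (List String)),
          pvStep party (rs, key, cur) p = (rs, key, cur ++ [p]) := by
        intro rs; simp [pvStep, hk, hc]
      rw [List.foldl_cons, hstep, List.foldl_cons, hstep]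
      exact ih _ _ _ (by simp)
    · have hstep : ∀ rs : List (Bool × List (List String)),
          pvStep party (rs, key, cur) p = (rs ++ [(key, cur)], pvKey party p, [p]) := by
        intro rs; simp [pvStep, hk, hc]
      rw [List.foldl_cons, hstep, List.foldl_cons, hstep,
        show ([] : List (Bool × List (List String))) ++ [(key, cur)] = [(key, cur)] from rfl,
        ih _ _ _ (by simp), ih [(key, cur)] _ _ (by simp), List.append_assoc]

-- the first-party-group count of the fold, with an open run (key, cur)
theorem pvFoldCount (party : String) :
    ∀ (l : List (List String)) (key : Bool) (cur : List (List String)), cur ≠ [] →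
      pvCountFirst (pvFinalize (l.foldl (pvStep party) ([], key, cur)))
        = if key then ((((cur ++ l.takeWhile (pvKey party)).filter pvInv).length : Nat) : Int)
          else (((pvSection party l).filter pvInv).length : Int) := by
  intro l
  induction l with
  | nil =>
    intro key cur hc
    cases key <;> simp [pvFinalize, if_pos hc, pvCountFirst, pvSection]
  | cons p rest ih =>
    intro key cur hc
    by_cases hk : pvKey party p = key
    · have hstep : pvStep party ([], key, cur) p = ([], key, cur ++ [p]) := by
        simp [pvStep, hk, hc]
      rw [List.foldl_cons, hstep, ih key (cur ++ [p]) (by simp)]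
      cases key with
      | false =>
        have hs : pvSection party (p :: rest) = pvSection party rest := by
          simp [pvSection, List.dropWhile_cons, hk]
        simp [hs]
      | true =>
        simp [List.takeWhile_cons, hk, List.append_assoc]
    · have hstep0 : pvStep party ([], key, cur) p = ([(key, cur)], pvKey party p, [p]) := by
        simp [pvStep, hk, hc]
      rw [List.foldl_cons, hstep0, pvShift party rest [(key, cur)] (pvKey party p) [p] (by simp)]
      cases key with
      | true =>
        have hk' : pvKey party p = false := by simpa [hk] using (Bool.eq_false_iff.mpr hk)
        simp [pvCountFirst, List.takeWhile_cons, hk']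
      | false =>
        have hk' : pvKey party p = true := by
          cases h : pvKey party p with
          | true => rfl
          | false => exact absurd h hk
        have hs : pvSection party (p :: rest) = p :: rest.takeWhile (pvKey party) := by
          simp [pvSection, List.dropWhile_cons, hk', List.takeWhile_cons]
        rw [List.singleton_append]
        simp only [pvCountFirst]
        rw [if_neg (by simp : ¬ (false : Bool) = true), ih (pvKey party p) [p] (by simp), hk', hs]
        simp

-- B's per-ballot value = invalid count of the first party section
theorem pvB_ballot (party : String) (ballot : List (List String)) :
    pvCountFirst (pvRuns party ballot)
      = (((pvSection party ballot).filter pvInv).length : Int) := by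
  cases ballot with
  | nil => simp [pvRuns, pvFinalize, pvCountFirst, pvSection]
  | cons p rest =>
    have h0 : pvStep party ([], false, []) p = ([], pvKey party p, [p]) := by
      simp [pvStep]
    rw [pvRuns, List.foldl_cons, h0, pvFoldCount party rest (pvKey party p) [p] (by simp)]
    cases hk : pvKey party p with
    | true =>
      have hs : pvSection party (p :: rest) = p :: rest.takeWhile (pvKey party) := by
        simp [pvSection, List.dropWhile_cons, hk, List.takeWhile_cons]
      simp [hs]
    | false =>
      have hs : pvSection party (p :: rest) = pvSection party rest := by
        simp [pvSection, List.dropWhile_cons, hk]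
      simp [hs]

theorem pv_foldl_eq (party : String) (data : List (List (List String))) :
    ∀ acc : Int,
      data.foldl (fun acc ballot => pvA_inner party ballot false acc) acc
        = data.foldl (fun acc ballot => acc + pvCountFirst (pvRuns party ballot)) acc := by
  induction data with
  | nil => intro acc; rfl
  | cons b rest ih =>
    intro acc
    simp only [List.foldl_cons]
    rw [pvA_false_eq party b acc, ← pvB_ballot party b]
    exact ih _

-- ===== VERDICT (by name: the statement is the Claim_ definition above) =====
theorem count_party_invalid_votes_spec : Claim_equal_count_party_invalid_votes := by
  intro party data _ _
  unfold Spec_count_party_invalid_votes count_party_invalid_votes count_party_invalid_votes_alt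
  exact pv_foldl_eq party data 0
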